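-- pv_equiv track=rewrite | github.com/jmsung/einstein | scripts/difference_bases/extended_span_search.py | c_of
-- ===== SOURCE A (Python) =====
-- def c_of(A_set):
--     """Longest contiguous prefix of (A − A)+ starting at 1."""
--     diffs = set()
--     A_list = sorted(A_set)
--     n = len(A_list)
--     for i in range(n):
--         for j in range(i):
--             diffs.add(A_list[i] - A_list[j])
--     c = 0
--     while (c + 1) in diffs:
--         c += 1
--     return c
-- ===== SOURCE B (Python) =====
-- def c_of(A_set):
--     """Longest contiguous prefix of (A - A)+ starting at 1."""
--     A = set(A_set)
--     c = 0
--     while any(a + c + 1 in A for a in A):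
--         c += 1
--     return c
-- ===== Notes on version B (the rewrite author's own statement) =====
-- stated objective: alternative
-- what changed: B never builds the pairwise-difference set: it tests candidate differences d=1,2,... directly against a hash set of the input (any(a+d in A for a in A)) and stops at the first unrepresentable d; it trades A's build-all-differences-then-scan for an incremental membership probe and is lazy in the answer c.
import Mathlib
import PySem

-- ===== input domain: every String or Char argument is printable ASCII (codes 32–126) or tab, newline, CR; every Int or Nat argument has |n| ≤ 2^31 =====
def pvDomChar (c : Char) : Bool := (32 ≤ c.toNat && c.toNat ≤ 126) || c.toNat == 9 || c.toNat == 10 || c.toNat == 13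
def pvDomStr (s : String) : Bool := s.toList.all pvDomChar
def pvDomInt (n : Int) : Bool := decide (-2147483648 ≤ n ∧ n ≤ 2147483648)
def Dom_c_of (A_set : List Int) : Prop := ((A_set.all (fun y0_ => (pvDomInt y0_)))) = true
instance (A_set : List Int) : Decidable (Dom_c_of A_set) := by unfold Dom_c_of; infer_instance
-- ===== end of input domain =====

-- B avoids materialising A's pairwise-difference set: it probes candidate differences 1,2,… directly against the input set.

-- ===== PORT A =====
-- the nested 'for i in range(n): for j in range(i): diffs.add(A_list[i]-A_list[j])'
def c_of_diffs (A_list : List Int) : PySem.Set Int :=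
  (PySem.List.pyRange 0 (A_list.length : Int) 1).foldl (fun diffs i =>
    (PySem.List.pyRange 0 i 1).foldl (fun diffs j =>
      PySem.Set.add diffs (PySem.List.pyGetD A_list i 0 - PySem.List.pyGetD A_list j 0)) diffs)
    PySem.Set.empty

-- 'while (c+1) in diffs: c += 1'; fuel: each step consumes a fresh member c+1 of the finite set, so |diffs|+1 steps suffice (proved below)
def c_of_loop (diffs : PySem.Set Int) : Nat → Int → Int
  | 0, c => c
  | fuel+1, c => if PySem.Set.contains diffs (c + 1) then c_of_loop diffs fuel (c + 1) else c

def c_of (A_set : List Int) : Int :=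
  let A_list := PySem.List.sorted A_set (fun x => x) false
  let diffs := c_of_diffs A_list
  c_of_loop diffs (diffs.length + 1) 0

-- ===== PORT B =====
-- 'while any(a + c + 1 in A for a in A): c += 1'; fuel: no d > max(A)-min(A) is representable (proved below)
def c_of_alt_loop (A : PySem.Set Int) : Nat → Int → Int
  | 0, c => c
  | fuel+1, c => if A.any (fun a => PySem.Set.contains A (a + c + 1)) then c_of_alt_loop A fuel (c + 1) else c

def c_of_alt (A_set : List Int) : Int :=
  let A : PySem.Set Int := PySem.Set.ofList A_set
  let fuel : Nat := match A with
    | [] => 1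
    | a :: t => ((t.foldl max a) - (t.foldl min a)).toNat + 1
  c_of_alt_loop A fuel 0

-- ===== PRECONDITION & SPEC =====
def Spec_c_of (A_set : List Int) (out : Int) : Prop := out = c_of_alt A_set
instance (A_set : List Int) (out : Int) : Decidable (Spec_c_of A_set out) := by unfold Spec_c_of; infer_instance

-- ===== CLAIM (what is proved, stated in full; the proofs are below) =====
def Claim_equal_c_of : Prop := ∀ (A_set : List Int), Dom_c_of A_set → Spec_c_of A_set (c_of A_set)

-- ===== LEMMAS AND PROOFS =====

-- the common while-loop shape: bump c while the guard holds at c+1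
def pvRun (g : Int → Bool) : Nat → Int → Int
  | 0, c => c
  | fuel+1, c => if g (c + 1) then pvRun g fuel (c + 1) else c

theorem c_of_loop_eq_run (s : PySem.Set Int) (fuel : Nat) (c : Int) :
    c_of_loop s fuel c = pvRun (fun d => PySem.Set.contains s d) fuel c := by
  induction fuel generalizing c with
  | zero => rfl
  | succ f ih => simp only [c_of_loop, pvRun, ih]

theorem c_of_alt_loop_eq_run (A : PySem.Set Int) (fuel : Nat) (c : Int) :
    c_of_alt_loop A fuel c = pvRun (fun d => A.any (fun a => PySem.Set.contains A (a + d))) fuel c := by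
  induction fuel generalizing c with
  | zero => rfl
  | succ f ih =>
    simp only [c_of_alt_loop, pvRun, ih]
    have h : (A.any fun a => PySem.Set.contains A (a + c + 1))
         = (A.any fun a => PySem.Set.contains A (a + (c + 1))) := by
      apply PySem.List.any_congr_mem; intro x _; rw [add_assoc]
    rw [h]

theorem pvRun_eq_pvRun (g g' : Int → Bool) (h : ∀ d, 0 < d → g d = g' d) :
    ∀ (fuel fuel' : Nat) (c : Int), 0 ≤ c →
    (∃ k : Nat, k < fuel ∧ k < fuel' ∧ g (c + k + 1) = false) →
    pvRun g fuel c = pvRun g' fuel' c := by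
  intro fuel
  induction fuel with
  | zero =>
    rintro fuel' c _ ⟨k, hk, _, _⟩; omega
  | succ f ih =>
    rintro fuel' c hc ⟨k, hk, hk', hfa⟩
    match fuel', hk' with
    | f' + 1, hk' =>
      have hgg : g (c + 1) = g' (c + 1) := h (c + 1) (by omega)
      by_cases hg : g (c + 1) = true
      · have hg' : g' (c + 1) = true := by rw [← hgg]; exact hg
        rw [pvRun, pvRun, if_pos hg, if_pos hg']
        have hk0 : k ≠ 0 := by
          rintro rfl
          simp only [Nat.cast_zero, add_zero] at hfa
          simp [hfa] at hg
        obtain ⟨m, rfl⟩ := Nat.exists_eq_succ_of_ne_zero hk0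
        refine ih f' (c + 1) (by omega) ⟨m, by omega, by omega, ?_⟩
        have : c + 1 + (m : Int) + 1 = c + ((m : Nat) + 1 : Nat) + 1 := by push_cast; ring
        rw [this]; exact hfa
      · have hg' : ¬ g' (c + 1) = true := by rw [← hgg]; exact hg
        rw [pvRun, pvRun, if_neg hg, if_neg hg']

theorem mem_foldl_add {β : Type} (l : List β) (f : β → Int) (s : List Int) (d : Int) :
    d ∈ l.foldl (fun s b => PySem.Set.add s (f b)) s ↔ d ∈ s ∨ ∃ b ∈ l, f b = d := by
  induction l generalizing s with
  | nil => simp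
  | cons x t ih =>
    simp only [List.foldl_cons, ih, PySem.Set.mem_add, List.mem_cons]
    constructor
    · rintro ((hs | he) | ⟨b, hb, hfb⟩)
      · exact Or.inl hs
      · exact Or.inr ⟨x, Or.inl rfl, he.symm⟩
      · exact Or.inr ⟨b, Or.inr hb, hfb⟩
    · rintro (hs | ⟨b, (rfl | hb), hfb⟩)
      · exact Or.inl (Or.inl hs)
      · exact Or.inl (Or.inr hfb.symm)
      · exact Or.inr ⟨b, hb, hfb⟩

theorem nodup_foldl_add {β : Type} (l : List β) (f : β → Int) (s : List Int) (hs : s.Nodup) :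
    (l.foldl (fun s b => PySem.Set.add s (f b)) s).Nodup := by
  induction l generalizing s with
  | nil => exact hs
  | cons x t ih => exact ih _ (PySem.Set.nodup_add _ _ hs)

theorem mem_foldl_nested {β γ : Type} (l : List β) (r : β → List γ) (f : β → γ → Int)
    (s : List Int) (d : Int) :
    d ∈ l.foldl (fun s i => (r i).foldl (fun s j => PySem.Set.add s (f i j)) s) s ↔
      d ∈ s ∨ ∃ i ∈ l, ∃ j ∈ r i, f i j = d := by
  induction l generalizing s with
  | nil => simp
  | cons x t ih =>
    simp only [List.foldl_cons, ih, mem_foldl_add, List.mem_cons]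
    constructor
    · rintro ((hs | ⟨j, hj, hfj⟩) | ⟨i, hi, hj⟩)
      · exact Or.inl hs
      · exact Or.inr ⟨x, Or.inl rfl, j, hj, hfj⟩
      · exact Or.inr ⟨i, Or.inr hi, hj⟩
    · rintro (hs | ⟨i, (rfl | hi), j, hj, hfj⟩)
      · exact Or.inl (Or.inl hs)
      · exact Or.inl (Or.inr ⟨j, hj, hfj⟩)
      · exact Or.inr ⟨i, hi, j, hj, hfj⟩

theorem nodup_foldl_nested {β γ : Type} (l : List β) (r : β → List γ) (f : β → γ → Int)
    (s : List Int) (hs : s.Nodup) :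
    (l.foldl (fun s i => (r i).foldl (fun s j => PySem.Set.add s (f i j)) s) s).Nodup := by
  induction l generalizing s with
  | nil => exact hs
  | cons x t ih => exact ih _ (nodup_foldl_add _ _ _ hs)

theorem mem_c_of_diffs (L : List Int) (d : Int) :
    d ∈ c_of_diffs L ↔ ∃ i j : Int, 0 ≤ j ∧ j < i ∧ i < (L.length : Int) ∧
      PySem.List.pyGetD L i 0 - PySem.List.pyGetD L j 0 = d := by
  unfold c_of_diffs
  rw [mem_foldl_nested]
  simp only [PySem.Set.empty, List.not_mem_nil, false_or, PySem.List.mem_pyRange_one]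
  constructor
  · rintro ⟨i, ⟨h0i, hiL⟩, j, ⟨h0j, hji⟩, hfj⟩
    exact ⟨i, j, h0j, hji, hiL, hfj⟩
  · rintro ⟨i, j, h0j, hji, hiL, hfj⟩
    exact ⟨i, ⟨le_trans h0j (le_of_lt hji), hiL⟩, j, ⟨h0j, hji⟩, hfj⟩

theorem nodup_c_of_diffs (L : List Int) : (c_of_diffs L).Nodup := by
  unfold c_of_diffs
  exact nodup_foldl_nested _ _ _ _ List.nodup_nil

-- membership of a positive target in A's difference set is plain representability over the input list
theorem diffs_iff (A_set : List Int) (d : Int) (hd : 0 < d) :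
    d ∈ c_of_diffs (PySem.List.sorted A_set (fun x => x) false) ↔
      ∃ a ∈ A_set, a + d ∈ A_set := by
  rw [mem_c_of_diffs]
  constructor
  · rintro ⟨i, j, h0j, hji, hiL, heq⟩
    have h0i : 0 ≤ i := le_trans h0j (le_of_lt hji)
    rw [PySem.List.pyGetD_eq_getElem _ 0 h0i hiL,
        PySem.List.pyGetD_eq_getElem _ 0 h0j (lt_trans hji hiL)] at heq
    refine ⟨(PySem.List.sorted A_set (fun x => x) false)[j.toNat], ?_, ?_⟩
    · exact (PySem.List.mem_sorted _ _ _ _).mp (List.getElem_mem _)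
    · have : (PySem.List.sorted A_set (fun x => x) false)[j.toNat] + d
           = (PySem.List.sorted A_set (fun x => x) false)[i.toNat] := by omega
      rw [this]
      exact (PySem.List.mem_sorted _ _ _ _).mp (List.getElem_mem _)
  · rintro ⟨a, haA, hadA⟩
    have ha : a ∈ PySem.List.sorted A_set (fun x => x) false := (PySem.List.mem_sorted _ _ _ _).mpr haA
    have had : a + d ∈ PySem.List.sorted A_set (fun x => x) false := (PySem.List.mem_sorted _ _ _ _).mpr hadA
    obtain ⟨jn, hjn, hja⟩ := List.mem_iff_getElem.mp ha
    obtain ⟨in', hin, hia⟩ := List.mem_iff_getElem.mp had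
    have hlt : jn < in' := by
      by_contra hle
      push Not at hle
      have := PySem.List.sorted_id_getElem_mono A_set hle hjn
      omega
    refine ⟨(in' : Int), (jn : Int), by omega, by omega, by exact_mod_cast hin, ?_⟩
    rw [PySem.List.pyGetD_eq_getElem _ 0 (by omega) (by exact_mod_cast hin),
        PySem.List.pyGetD_eq_getElem _ 0 (by omega) (by exact_mod_cast (lt_trans hlt hin : jn < _))]
    simp only [Int.toNat_natCast]
    omega

theorem pigeonhole_missing (s : List Int) (hs : s.Nodup) :
    ∃ k : Nat, k ≤ s.length ∧ ((k : Int) + 1) ∉ s := by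
  by_contra hcon
  push Not at hcon
  have hsub : ((Finset.range (s.length + 1)).image (fun k : Nat => (k : Int) + 1)) ⊆ s.toFinset := by
    intro x hx
    simp only [Finset.mem_image, Finset.mem_range] at hx
    obtain ⟨k, hk, rfl⟩ := hx
    exact List.mem_toFinset.mpr (hcon k (by omega))
  have hinj : Function.Injective (fun k : Nat => (k : Int) + 1) := by
    intro a b hab; simp at hab; exact hab
  have hcard := Finset.card_le_card hsub
  rw [Finset.card_image_of_injective _ hinj, Finset.card_range,
      List.toFinset_card_of_nodup hs] at hcard
  omega

-- B's fuel is enough: the probe value one past max-min is never representable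
theorem b_fuel_false (A : PySem.Set Int) :
    ∃ kb : Nat,
      kb + 1 = (match A with
        | [] => 1
        | a :: t => ((t.foldl max a) - (t.foldl min a)).toNat + 1) ∧
      (A.any fun x => PySem.Set.contains A (x + ((0 : Int) + kb + 1))) = false := by
  cases A with
  | nil => exact ⟨0, rfl, rfl⟩
  | cons a t =>
    refine ⟨((t.foldl max a) - (t.foldl min a)).toNat, rfl, ?_⟩
    rw [Bool.eq_false_iff]
    intro hany
    rw [List.any_eq_true] at hany
    obtain ⟨x, hx, hxc⟩ := hany
    rw [PySem.Set.contains_iff] at hxc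
    have hmax := PySem.List.le_foldl_max t a
    have hmin := PySem.List.foldl_min_le t a
    have hub : ∀ y ∈ a :: t, y ≤ t.foldl max a := by
      intro y hy
      rcases List.mem_cons.mp hy with rfl | hm
      · exact hmax.1
      · exact hmax.2 _ hm
    have hlb : ∀ y ∈ a :: t, t.foldl min a ≤ y := by
      intro y hy
      rcases List.mem_cons.mp hy with rfl | hm
      · exact hmin.1
      · exact hmin.2 _ hm
    have hxup := hub _ hxc
    have hxlo := hlb _ hx
    have hspread : (0 : Int) ≤ t.foldl max a - t.foldl min a := by
      have := hmax.1; have := hmin.1; omega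
    rw [Int.toNat_of_nonneg hspread] at hxup
    omega

-- ===== VERDICT (by name: the statement is the Claim_ definition above) =====
theorem c_of_spec : Claim_equal_c_of := by
  intro A_set _
  unfold Spec_c_of c_of c_of_alt
  rw [c_of_loop_eq_run, c_of_alt_loop_eq_run]
  have hguard : ∀ d : Int, 0 < d →
      (PySem.Set.contains (c_of_diffs (PySem.List.sorted A_set (fun x => x) false)) d)
        = ((PySem.Set.ofList A_set).any fun a =>
            PySem.Set.contains (PySem.Set.ofList A_set) (a + d)) := by
    intro d hd
    rw [Bool.eq_iff_iff]
    simp only [PySem.Set.contains_iff, List.any_eq_true, PySem.Set.mem_ofList]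
    exact diffs_iff A_set d hd
  apply pvRun_eq_pvRun _ _ hguard _ _ 0 le_rfl
  -- a common failing index below both fuels
  have hA : ∃ k : Nat, PySem.Set.contains
      (c_of_diffs (PySem.List.sorted A_set (fun x => x) false)) ((0 : Int) + k + 1) = false := by
    obtain ⟨k, _, hk⟩ := pigeonhole_missing _ (nodup_c_of_diffs (PySem.List.sorted A_set (fun x => x) false))
    refine ⟨k, ?_⟩
    simp only [Bool.eq_false_iff, ne_eq, PySem.Set.contains_iff]
    simpa using hk
  classical
  obtain ⟨kb, hkb, hkbf⟩ := b_fuel_false (PySem.Set.ofList A_set)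
  -- kb also fails A's guard, since the guards agree at the positive value kb+1
  have hkbA : PySem.Set.contains
      (c_of_diffs (PySem.List.sorted A_set (fun x => x) false)) ((0 : Int) + kb + 1) = false := by
    rw [hguard ((0 : Int) + kb + 1) (by omega)]
    exact hkbf
  have hkstarf := Nat.find_spec hA
  have hkA : Nat.find hA ≤ (c_of_diffs (PySem.List.sorted A_set (fun x => x) false)).length := by
    obtain ⟨k', hk'len, hk'm⟩ := pigeonhole_missing _ (nodup_c_of_diffs (PySem.List.sorted A_set (fun x => x) false))
    have : Nat.find hA ≤ k' := by
      apply Nat.find_le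
      simp only [Bool.eq_false_iff, ne_eq, PySem.Set.contains_iff]
      simpa using hk'm
    omega
  have hkB : Nat.find hA ≤ kb := Nat.find_le hkbA
  exact ⟨Nat.find hA, by omega, by omega, hkstarf⟩
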